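-- pv_equiv track=rewrite | github.com/timo-verstraeten/mats-experiments | plots/Scripts/plotResults.py | getFileFlags
-- ===== SOURCE A (Python) =====
-- def getFileFlags(filename):
--     tmp = filename.split("_")
--     flags = set()
--     curr_flag = ""
--     for t in tmp:
--         curr_flag += t
--         if "=" in curr_flag:
--             flags.add(curr_flag)
--             curr_flag = ""
--         else:
--             curr_flag += "_"
--     return flags
-- ===== SOURCE B (Python) =====
-- def getFileFlags(filename):
--     tokens = filename.split("_")
--     bounds = [i for i, t in enumerate(tokens) if "=" in t]
--     flags = set()
--     start = 0
--     for i in bounds: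
--         flags.add("_".join(tokens[start:i + 1]))
--         start = i + 1
--     return flags
-- ===== Notes on version B (the rewrite author's own statement) =====
-- stated objective: alternative
-- what changed: Replaces A's single accumulate-and-reset scan with a buffer string by a two-pass scheme: first compute the indices of '='-bearing tokens, then slice the token list between consecutive boundaries and join each slice.
import Mathlib
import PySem

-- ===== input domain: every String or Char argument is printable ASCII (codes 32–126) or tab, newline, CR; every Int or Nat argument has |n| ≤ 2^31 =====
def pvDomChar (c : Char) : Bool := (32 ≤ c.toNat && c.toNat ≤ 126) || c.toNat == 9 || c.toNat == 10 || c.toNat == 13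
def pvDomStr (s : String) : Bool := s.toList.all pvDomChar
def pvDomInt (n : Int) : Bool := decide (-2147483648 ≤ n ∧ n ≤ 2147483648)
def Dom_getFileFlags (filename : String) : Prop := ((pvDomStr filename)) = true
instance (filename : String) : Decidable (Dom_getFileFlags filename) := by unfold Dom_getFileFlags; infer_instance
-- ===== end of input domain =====

-- B replaces A's accumulate-and-reset scan by a two-pass scheme (boundary indices, then slice-and-join);
-- same cost, alternative decomposition. Both return the set of flags (order-insensitive).

-- ===== PORT A =====
-- A: split on '_', then one scan with a growing buffer `curr_flag`, emitting it whenever it contains '='.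
def getFileFlags (filename : String) : List String :=
  let tmp := (PySem.Str.split? filename "_").getD []   -- sep = "_" ≠ "", so split? is `some`: exact
  let res := tmp.foldl (fun (st : PySem.Set String × String) t =>
      let curr := st.2 ++ t
      if PySem.Str.isIn "=" curr then (PySem.Set.add st.1 curr, "")
      else (st.1, curr ++ "_")) (PySem.Set.empty, "")
  res.1

-- ===== PORT B =====
-- B: split on '_', collect the indices of '='-bearing tokens, then join the token slice up to each boundary.
def getFileFlags_alt (filename : String) : List String :=
  let tokens := (PySem.Str.split? filename "_").getD []   -- sep = "_" ≠ "", so split? is `some`: exact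
  let bounds := ((PySem.List.enumerate tokens).filter (fun p => PySem.Str.isIn "=" p.2)).map (·.1)
  let res := bounds.foldl (fun (st : PySem.Set String × Int) i =>
      (PySem.Set.add st.1 (PySem.Str.join "_" (PySem.List.slice tokens (some st.2) (some (i + 1)))), i + 1))
      (PySem.Set.empty, (0 : Int))
  res.1

-- ===== PRECONDITION & SPEC =====
def Spec_getFileFlags (filename : String) (out : List String) : Prop := out = getFileFlags_alt filename
instance (filename : String) (out : List String) : Decidable (Spec_getFileFlags filename out) := by unfold Spec_getFileFlags; infer_instance

-- ===== CLAIM (what is proved, stated in full; the proofs are below) =====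
def Claim_equal_getFileFlags : Prop := ∀ (filename : String), Dom_getFileFlags filename → Spec_getFileFlags filename (getFileFlags filename)

-- ===== LEMMAS AND PROOFS =====

-- "=" in t
def hasEq (t : String) : Bool := PySem.Str.isIn "=" t

-- A's loop body, named for the proofs
def stepA (st : PySem.Set String × String) (t : String) : PySem.Set String × String :=
  let curr := st.2 ++ t
  if PySem.Str.isIn "=" curr then (PySem.Set.add st.1 curr, "")
  else (st.1, curr ++ "_")

-- B's loop body, named for the proofs
def stepB (full : List String) (st : PySem.Set String × Int) (i : Int) : PySem.Set String × Int :=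
  (PySem.Set.add st.1 (PySem.Str.join "_" (PySem.List.slice full (some st.2) (some (i + 1)))), i + 1)

-- the common emitted-flag sequence: groups of tokens joined with '_', each ending at a '='-bearing token
def gspec : List String → List String → List String
  | _, [] => []
  | pending, t :: ts =>
      if hasEq t then PySem.Str.join "_" (pending ++ [t]) :: gspec [] ts
      else gspec (pending ++ [t]) ts

-- A's buffer contents for a pending token list
def trail : List String → String
  | [] => ""
  | p :: ps => p ++ "_" ++ trail ps

-- B's boundary index list, recursively
def bnds : Int → List String → List Int
  | _, [] => []
  | k, t :: ts => if hasEq t then k :: bnds (k + 1) ts else bnds (k + 1) ts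

lemma hasEq_iff (t : String) : hasEq t = true ↔ '=' ∈ t.toList := by
  show PySem.Str.isIn "=" t = true ↔ _
  rw [PySem.Str.isIn_eq]
  have h : ("=" : String).toList = ['='] := rfl
  rw [h, PySem.Chars.isIn_iff_infix, List.singleton_infix_iff]

lemma noEq_trail (ps : List String) (h : ∀ p ∈ ps, hasEq p = false) :
    '=' ∉ (trail ps).toList := by
  induction ps with
  | nil => simp [trail]
  | cons p ps ih =>
      simp only [trail, String.toList_append, List.mem_append]
      rintro ((hm | hm) | hm)
      · exact absurd ((hasEq_iff p).mpr hm) (by simp [h p List.mem_cons_self])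
      · revert hm; decide
      · exact ih (fun q hq => h q (List.mem_cons_of_mem _ hq)) hm

lemma hasEq_trail_append (ps : List String) (t : String)
    (h : ∀ p ∈ ps, hasEq p = false) : hasEq (trail ps ++ t) = hasEq t := by
  by_cases ht : hasEq t = true
  · rw [ht]
    rw [hasEq_iff] at ht ⊢
    simp [String.toList_append, ht]
  · simp only [Bool.not_eq_true] at ht
    rw [ht, Bool.eq_false_iff, Ne, hasEq_iff]
    rw [Bool.eq_false_iff, Ne, hasEq_iff] at ht
    simp only [String.toList_append, List.mem_append]
    rintro (hm | hm)
    · exact noEq_trail ps h hm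
    · exact ht hm

lemma trail_append_singleton (ps : List String) (t : String) :
    trail (ps ++ [t]) = trail ps ++ t ++ "_" := by
  induction ps with
  | nil => simp [trail]
  | cons p ps ih =>
      simp only [List.cons_append, trail, ih]
      simp [String.append_assoc]

lemma trail_join_chars (ps : List String) (t : String) :
    PySem.Chars.join "_".toList ((ps ++ [t]).map String.toList)
      = (trail ps).toList ++ t.toList := by
  induction ps with
  | nil => simp [PySem.Chars.join_singleton, trail]
  | cons p ps ih =>
      obtain ⟨q, rest, hqr⟩ :=
        List.exists_cons_of_ne_nil (l := ((ps ++ [t]).map String.toList)) (by simp)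
      simp only [List.cons_append, List.map_cons]
      rw [hqr, PySem.Chars.join_cons_cons, ← hqr, ih]
      simp [trail, String.toList_append, List.append_assoc]

lemma trail_join (ps : List String) (t : String) :
    trail ps ++ t = PySem.Str.join "_" (ps ++ [t]) := by
  apply String.toList_injective
  rw [String.toList_append, PySem.Str.toList_join, trail_join_chars]

-- A's loop computes the gspec groups
lemma foldA (ts : List String) (ps : List String) (s : PySem.Set String)
    (h : ∀ p ∈ ps, hasEq p = false) :
    (ts.foldl stepA (s, trail ps)).1 = (gspec ps ts).foldl PySem.Set.add s := by
  induction ts generalizing ps s with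
  | nil => simp [gspec]
  | cons t ts ih =>
      rw [List.foldl_cons]
      have hcur : hasEq (trail ps ++ t) = hasEq t := hasEq_trail_append ps t h
      by_cases ht : hasEq t = true
      · have hc : PySem.Str.isIn "=" (trail ps ++ t) = true := by rw [← hcur] at ht; exact ht
        have hstep : stepA (s, trail ps) t = (PySem.Set.add s (trail ps ++ t), "") := by
          simp only [stepA]; rw [if_pos hc]
        have h0 : ("" : String) = trail [] := rfl
        rw [hstep, trail_join, h0, ih [] _ (by simp), gspec, if_pos ht]
        rfl
      · simp only [Bool.not_eq_true] at ht
        have hc : PySem.Str.isIn "=" (trail ps ++ t) = false := by rw [← hcur] at ht; exact ht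
        have hstep : stepA (s, trail ps) t = (s, trail (ps ++ [t])) := by
          simp only [stepA]
          rw [if_neg (by rw [hc]; exact Bool.false_ne_true), trail_append_singleton]
        rw [hstep, gspec, if_neg (by simp [ht])]
        exact ih (ps ++ [t]) s (by
          intro p hp
          rcases List.mem_append.mp hp with hp | hp
          · exact h p hp
          · simp only [List.mem_singleton] at hp; subst hp; exact ht)

-- the port's comprehension computes bnds
lemma bounds_eq (ts : List String) (k : Int) :
    ((PySem.List.enumerate ts k).filter (fun p => PySem.Str.isIn "=" p.2)).map (·.1)
      = bnds k ts := by
  induction ts generalizing k with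
  | nil => simp [PySem.List.enumerate_nil, bnds]
  | cons t ts ih =>
      rw [PySem.List.enumerate_cons, List.filter_cons]
      split
      next hcond =>
        have ht : hasEq t = true := hcond
        rw [List.map_cons, ih, bnds, if_pos ht]
      next hcond =>
        have ht : hasEq t = false := by
          have h' := hcond; simp only [Bool.not_eq_true] at h'; exact h'
        rw [ih, bnds, if_neg (by rw [ht]; exact Bool.false_ne_true)]

-- B's loop over the boundaries of the unconsumed suffix ts computes the gspec groups;
-- C is the consumed token prefix, s0 the current group start (an index into C)
lemma foldB (ts C : List String) (s0 : Nat) (s : PySem.Set String)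
    (hs0 : s0 ≤ C.length) (h : ∀ p ∈ C.drop s0, hasEq p = false) :
    ((bnds (C.length : Int) ts).foldl (stepB (C ++ ts)) (s, (s0 : Int))).1
      = (gspec (C.drop s0) ts).foldl PySem.Set.add s := by
  induction ts generalizing C s0 s with
  | nil => simp [bnds, gspec]
  | cons t ts ih =>
      by_cases ht : hasEq t = true
      · rw [bnds, if_pos ht, gspec, if_pos ht, List.foldl_cons]
        have hslice : PySem.List.slice (C ++ t :: ts) (some (s0 : Int)) (some ((C.length : Int) + 1))
            = C.drop s0 ++ [t] := by
          have hcast : (C.length : Int) + 1 = ((C.length + 1 : Nat) : Int) := by push_cast; ring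
          rw [hcast, PySem.List.slice_natCast, List.drop_append_of_le_length hs0]
          have hlen : C.length + 1 - s0 = (C.drop s0).length + 1 := by
            simp [List.length_drop]; omega
          rw [hlen]
          rw [show (C.drop s0).length + 1 = (C.drop s0).length + [t].length by simp]
          rw [List.take_append]
          simp
        have hstep : stepB (C ++ t :: ts) (s, (s0 : Int)) (C.length : Int)
            = (PySem.Set.add s (PySem.Str.join "_" (C.drop s0 ++ [t])), (C.length : Int) + 1) := by
          simp [stepB, hslice]
        rw [hstep]
        have hC' : C ++ t :: ts = (C ++ [t]) ++ ts := by simp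
        have hk : (C.length : Int) + 1 = (((C ++ [t]).length : Nat) : Int) := by
          simp
        rw [hC', hk]
        have hIH := ih (C ++ [t]) (C ++ [t]).length
          (PySem.Set.add s (PySem.Str.join "_" (C.drop s0 ++ [t]))) (le_refl _) (by simp)
        simp only [List.drop_length] at hIH
        rw [hIH, gspec.eq_def]
        rfl
      · simp only [Bool.not_eq_true] at ht
        rw [bnds, if_neg (by simp [ht]), gspec, if_neg (by simp [ht])]
        have hC' : C ++ t :: ts = (C ++ [t]) ++ ts := by simp
        have hdrop : (C ++ [t]).drop s0 = C.drop s0 ++ [t] := List.drop_append_of_le_length hs0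
        have hIH := ih (C ++ [t]) s0 s (by simp; omega)
          (by
            rw [hdrop]
            intro p hp
            rcases List.mem_append.mp hp with hp | hp
            · exact h p hp
            · simp only [List.mem_singleton] at hp; subst hp; exact ht)
        rw [hdrop] at hIH
        have hk : ((C ++ [t]).length : Int) = (C.length : Int) + 1 := by simp
        rw [hk] at hIH
        rw [hC']
        exact hIH

-- ===== VERDICT (by name: the statement is the Claim_ definition above) =====
theorem getFileFlags_spec : Claim_equal_getFileFlags := by
  intro filename _
  show getFileFlags filename = getFileFlags_alt filename
  unfold getFileFlags getFileFlags_alt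
  set ts := (PySem.Str.split? filename "_").getD [] with hts
  have eA : (fun (st : PySem.Set String × String) t =>
      let curr := st.2 ++ t
      if PySem.Str.isIn "=" curr then (PySem.Set.add st.1 curr, "")
      else (st.1, curr ++ "_")) = stepA := rfl
  have eB : (fun (st : PySem.Set String × Int) i =>
      (PySem.Set.add st.1 (PySem.Str.join "_" (PySem.List.slice ts (some st.2) (some (i + 1)))), i + 1))
      = stepB ts := rfl
  simp only [eA, eB, bounds_eq ts 0]
  have h0 : ("" : String) = trail [] := rfl
  have hA := foldA ts [] PySem.Set.empty (by simp)
  have hB := foldB ts [] 0 PySem.Set.empty (by simp) (by simp)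
  simp only [List.drop_nil, List.length_nil, Nat.cast_zero, List.nil_append] at hA hB
  rw [h0, hA, ← hB]
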